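-- pv_equiv track=rewrite | github.com/ErnstFinkAG/ha_addons | mk5s_client/mk5s_client.py | choose_best_3007
-- ===== SOURCE A (Python) =====
-- from typing import Dict, Any, List, Optional, Tuple
--
-- def choose_best_3007(pass_maps: List[Dict[str, Optional[str]]]) -> Dict[str, Optional[str]]:
--     # prefer a pass where 0D is plausible and != 14
--     best = pass_maps[0]
--     score_best = -1
--     for m in pass_maps:
--         v0d = m.get("3007.0D")
--         v14 = m.get("3007.14")
--         score = 0
--         if v0d and v0d != "X":
--             try:
--                 iv = int(v0d, 16)
--                 if iv > 1000:
--                     score += 2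
--                 if iv > 1000000:  # ~277h
--                     score += 2
--             except Exception:
--                 pass
--         if v0d and v14 and v0d != v14:
--             score += 2
--         # fan_starts/acc_vol non-X help too
--         if m.get("3007.0B") not in (None, "X"):
--             score += 1
--         if m.get("3007.0C") not in (None, "X"):
--             score += 1
--         if score > score_best:
--             best = m
--             score_best = score
--     return best
-- ===== SOURCE B (Python) =====
-- from typing import Dict, Any, List, Optional, Tuple
--
--
-- def _score_3007(m):
--     v0d = m.get("3007.0D")
--     v14 = m.get("3007.14")
--     iv = None
--     if v0d and v0d != "X":
--         try:
--             iv = int(v0d, 16)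
--         except ValueError:
--             iv = None
--     flags = (
--         iv is not None and iv > 1000,
--         iv is not None and iv > 1000000,
--         bool(v0d) and bool(v14) and v0d != v14,
--         m.get("3007.0B") not in (None, "X"),
--         m.get("3007.0C") not in (None, "X"),
--     )
--     return sum(w for w, f in zip((2, 2, 2, 1, 1), flags) if f)
--
--
-- def choose_best_3007(pass_maps):
--     # Two staged passes: score every map once, then scan the bounded score
--     # range 8..0 downwards and return the first map hitting the current
--     # target; the first target with a hit is the maximum score, so this is
--     # the earliest maximal-scoring map (scores always lie in [0, 8]).
--     scored = [(_score_3007(m), m) for m in pass_maps]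
--     for target in range(8, -1, -1):
--         for sc, m in scored:
--             if sc == target:
--                 return m
-- ===== Notes on version B (the rewrite author's own statement) =====
-- stated objective: alternative
-- what changed: Replaces A's single-pass running-best loop with a staged bucket selection: score every map once into a (score, map) list, then scan the bounded score range 8..0 downwards and return the first map that hits the current target; the score itself is computed as a weighted sum over a flags tuple instead of a sequential += chain.
-- outside the precondition, e.g. on choose_best_3007([]): A raises IndexError, B returns None
import Mathlib
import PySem

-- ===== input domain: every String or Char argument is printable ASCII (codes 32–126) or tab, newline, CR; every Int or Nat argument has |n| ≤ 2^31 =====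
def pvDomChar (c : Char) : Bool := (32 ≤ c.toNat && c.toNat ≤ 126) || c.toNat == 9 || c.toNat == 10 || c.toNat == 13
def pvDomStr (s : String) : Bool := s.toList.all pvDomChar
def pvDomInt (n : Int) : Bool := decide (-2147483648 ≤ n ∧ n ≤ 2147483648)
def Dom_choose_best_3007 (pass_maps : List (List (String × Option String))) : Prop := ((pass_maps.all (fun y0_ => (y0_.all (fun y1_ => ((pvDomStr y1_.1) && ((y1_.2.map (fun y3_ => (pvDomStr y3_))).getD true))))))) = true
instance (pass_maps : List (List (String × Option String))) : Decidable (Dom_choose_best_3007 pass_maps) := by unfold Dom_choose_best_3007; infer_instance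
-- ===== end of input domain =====

-- B replaces A's single-pass running-best loop by staged passes: score each map once
-- into a (score, map) list, then scan the bounded score range 8..0 downwards and
-- return the first map hitting the current target (alternative decomposition, same cost).

-- m.get(k) on the association-list dict (first match; missing and stored None both give none)
def pvGetVal (m : List (String × Option String)) (k : String) : Option String :=
  match m.find? (fun p => p.1 == k) with
  | some p => p.2
  | none => none

-- ===== PORT A =====
-- A's loop body: the sequential score += chain on the fetched values, then the running-best update
def scoreAcc (v0d v14 vb vc : Option String) : Int :=
  let score : Int := 0
  -- if v0d and v0d != "X": try iv = int(v0d, 16); += 2 if iv > 1000; += 2 if iv > 1000000; except: pass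
  let score : Int :=
    match v0d with
    | none => score
    | some s =>
      if s ≠ "" ∧ s ≠ "X" then
        match PySem.Int.ofStrBase? s 16 with
        | some iv => (score + (if iv > 1000 then 2 else 0)) + (if iv > 1000000 then 2 else 0)
        | none => score
      else score
  -- if v0d and v14 and v0d != v14: score += 2
  let score : Int :=
    match v0d, v14 with
    | some a, some b => if a ≠ "" ∧ (b ≠ "" ∧ a ≠ b) then score + 2 else score
    | _, _ => score
  -- if m.get("3007.0B") not in (None, "X"): score += 1   (and the same for "3007.0C")
  let score : Int :=
    match vb with
    | some s => if s ≠ "X" then score + 1 else score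
    | none => score
  let score : Int :=
    match vc with
    | some s => if s ≠ "X" then score + 1 else score
    | none => score
  score

def chooseStepA (st : (List (String × Option String)) × Int)
    (m : List (String × Option String)) : (List (String × Option String)) × Int :=
  let v0d := pvGetVal m "3007.0D"
  let v14 := pvGetVal m "3007.14"
  let score := scoreAcc v0d v14 (pvGetVal m "3007.0B") (pvGetVal m "3007.0C")
  if score > st.2 then (m, score) else st

def choose_best_3007 (pass_maps : List (List (String × Option String))) : List (String × Option String) :=
  match pass_maps with
  | [] => []          -- Python raises IndexError at pass_maps[0]; excluded by Pre_
  | b0 :: _ => (pass_maps.foldl chooseStepA (b0, -1)).1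

-- ===== PORT B =====
-- _score_3007(m): parse iv once, build the flags tuple, weighted sum over the true flags
def scoreB (m : List (String × Option String)) : Int :=
  let v0d := pvGetVal m "3007.0D"
  let v14 := pvGetVal m "3007.14"
  -- iv = int(v0d, 16) if v0d truthy and != "X" and parse succeeds, else None
  let iv : Option Int :=
    match v0d with
    | some s => if s ≠ "" ∧ s ≠ "X" then PySem.Int.ofStrBase? s 16 else none
    | none => none
  let f1 : Bool := match iv with | some i => decide (i > 1000) | none => false
  let f2 : Bool := match iv with | some i => decide (i > 1000000) | none => false
  let f3 : Bool :=
    match v0d, v14 with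
    | some a, some b => decide (a ≠ "" ∧ (b ≠ "" ∧ a ≠ b))
    | _, _ => false
  let f4 : Bool := match pvGetVal m "3007.0B" with | some s => s != "X" | none => false
  let f5 : Bool := match pvGetVal m "3007.0C" with | some s => s != "X" | none => false
  -- sum(w for w, f in zip((2, 2, 2, 1, 1), flags) if f)
  (([((2 : Int), f1), (2, f2), (2, f3), (1, f4), (1, f5)].filter (fun p => p.2)).map Prod.fst).sum

-- the inner 'for sc, m in scored: if sc == target: return m' loop (first hit or none)
def scanStep (scored : List (Int × List (String × Option String)))
    (acc : Option (List (String × Option String))) (t : Int) :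
    Option (List (String × Option String)) :=
  match acc with
  | some r => some r
  | none => (scored.find? (fun p => p.1 == t)).map Prod.snd

def choose_best_3007_alt (pass_maps : List (List (String × Option String))) : List (String × Option String) :=
  let scored := pass_maps.map (fun m => (scoreB m, m))
  match (PySem.List.pyRange 8 (-1) (-1)).foldl (scanStep scored) none with
  | some r => r
  | none => []   -- Python falls through and returns None, only reachable for pass_maps = [] (excluded by Pre_)

-- ===== PRECONDITION & SPEC =====
-- Pre_ excludes only the empty list, on which A raises IndexError (B returns None there).
def Pre_choose_best_3007 (pass_maps : List (List (String × Option String))) : Prop :=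
  pass_maps ≠ []
instance (pass_maps : List (List (String × Option String))) : Decidable (Pre_choose_best_3007 pass_maps) := by
  unfold Pre_choose_best_3007; infer_instance
def pvWitness_choose_best_3007 : (List (List (String × Option String))) := [[("3007.0D", some "FFFF")]]

def Spec_choose_best_3007 (pass_maps : List (List (String × Option String))) (out : List (String × Option String)) : Prop := out = choose_best_3007_alt pass_maps
instance (pass_maps : List (List (String × Option String))) (out : List (String × Option String)) : Decidable (Spec_choose_best_3007 pass_maps out) := by unfold Spec_choose_best_3007; infer_instance

-- ===== CLAIM (what is proved, stated in full; the proofs are below) =====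
def Claim_equal_choose_best_3007 : Prop := ∀ (pass_maps : List (List (String × Option String))), Dom_choose_best_3007 pass_maps → Pre_choose_best_3007 pass_maps → Spec_choose_best_3007 pass_maps (choose_best_3007 pass_maps)

-- ===== LEMMAS AND PROOFS =====

-- A's score, as a function of the map
def scoreA (m : List (String × Option String)) : Int :=
  scoreAcc (pvGetVal m "3007.0D") (pvGetVal m "3007.14")
    (pvGetVal m "3007.0B") (pvGetVal m "3007.0C")

-- B's weighted-flag list evaluates to a plain sum of ifs
theorem flagSum (f1 f2 f3 f4 f5 : Bool) :
    (([((2:Int),f1),(2,f2),(2,f3),(1,f4),(1,f5)].filter (fun p => p.2)).map Prod.fst).sum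
    = (if f1 then 2 else 0) + (if f2 then 2 else 0) + (if f3 then 2 else 0)
      + (if f4 then 1 else 0) + (if f5 then 1 else 0) := by
  cases f1 <;> cases f2 <;> cases f3 <;> cases f4 <;> cases f5 <;> decide

-- A's += chain and B's weighted flag sum agree
set_option maxHeartbeats 1600000 in
theorem scoreB_eq_scoreA (m : List (String × Option String)) : scoreB m = scoreA m := by
  simp only [scoreB, scoreA, scoreAcc, flagSum]
  generalize pvGetVal m "3007.0D" = v0d
  generalize pvGetVal m "3007.14" = v14
  generalize pvGetVal m "3007.0B" = vb
  generalize pvGetVal m "3007.0C" = vc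
  cases v0d with
  | none =>
    cases v14 <;> cases vb <;> cases vc <;> dsimp only <;>
      (try simp [bne_iff_ne, decide_eq_true_eq]) <;> (try split_ifs) <;> omega
  | some s =>
    cases v14 <;> cases vb <;> cases vc <;> dsimp only <;>
      by_cases hs : s ≠ "" ∧ s ≠ "X" <;>
      (try simp [hs, bne_iff_ne, decide_eq_true_eq]) <;>
      (try generalize PySem.Int.ofStrBase? s 16 = o) <;>
      (try cases o) <;>
      (try simp) <;> (try split_ifs) <;> omega

-- every score lies in [0, 8]
set_option maxHeartbeats 1600000 in
theorem scoreB_bounds (m : List (String × Option String)) : 0 ≤ scoreB m ∧ scoreB m ≤ 8 := by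
  simp only [scoreB, flagSum]
  generalize pvGetVal m "3007.0D" = v0d
  generalize pvGetVal m "3007.14" = v14
  generalize pvGetVal m "3007.0B" = vb
  generalize pvGetVal m "3007.0C" = vc
  cases v0d with
  | none =>
    cases v14 <;> cases vb <;> cases vc <;> dsimp only <;>
      (try simp [bne_iff_ne, decide_eq_true_eq]) <;> (try split_ifs) <;> omega
  | some s =>
    cases v14 <;> cases vb <;> cases vc <;> dsimp only <;>
      by_cases hs : s ≠ "" ∧ s ≠ "X" <;>
      (try simp [hs, bne_iff_ne, decide_eq_true_eq]) <;>
      (try generalize PySem.Int.ofStrBase? s 16 = o) <;>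
      (try cases o) <;>
      (try simp) <;> (try split_ifs) <;> omega

theorem scoreB_funext : scoreB = scoreA := funext scoreB_eq_scoreA

-- A's loop body is exactly "replace the running best iff the new map scores strictly higher"
theorem chooseStepA_eq (st : (List (String × Option String)) × Int)
    (m : List (String × Option String)) :
    chooseStepA st m = if st.2 < scoreA m then (m, scoreA m) else st := rfl

-- max?'s option-accumulator fold equals the plain running-max fold
theorem max?_go {α : Type} (f : α → Int) (t : List α) (b : α) :
    t.foldl (fun (acc : Option α) x => match acc with
      | none => some x
      | some m => if f m < f x then some x else some m) (some b)
    = some (t.foldl (fun b x => if f b < f x then x else b) b) := by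
  induction t generalizing b with
  | nil => rfl
  | cons x t' ih =>
    rw [List.foldl_cons, List.foldl_cons]
    by_cases h : f b < f x <;> simp only [h, ite_true, ite_false] <;> exact ih _

theorem max?_cons {α : Type} (f : α → Int) (h : α) (t : List α) :
    PySem.List.max? (h :: t) f = some (t.foldl (fun b x => if f b < f x then x else b) h) := by
  simp only [PySem.List.max?, List.foldl_cons]
  exact max?_go f t h

-- the running max never moves off b when nothing scores strictly higher
theorem foldl_max_stays {α : Type} (f : α → Int) (t : List α) (b : α)
    (h : ∀ x ∈ t, f x ≤ f b) :
    t.foldl (fun b x => if f b < f x then x else b) b = b := by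
  induction t with
  | nil => rfl
  | cons x t' ih =>
    have hx : ¬ f b < f x := not_lt.mpr (h x (List.mem_cons_self))
    rw [List.foldl_cons, if_neg hx]
    exact ih (fun y hy => h y (List.mem_cons_of_mem _ hy))

-- if every score is ≤ c and m is the first element scoring exactly c,
-- then the running-max fold from h over t lands on m
theorem foldl_max_attain {α : Type} (f : α → Int) (c : Int) (m : α) :
    ∀ (t : List α) (h : α), f h ≤ c → (∀ x ∈ t, f x ≤ c) →
      (h :: t).find? (fun x => f x == c) = some m →
      t.foldl (fun b x => if f b < f x then x else b) h = m := by
  intro t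
  induction t with
  | nil =>
    intro h _ _ hf
    by_cases hh : (f h == c) = true
    · rw [List.find?_cons_of_pos (p := fun x => f x == c) hh] at hf
      simpa using hf
    · rw [List.find?_cons_of_neg (p := fun x => f x == c) hh] at hf
      exact absurd hf (by simp)
  | cons x t' ih =>
    intro h hhc hb hf
    rw [List.foldl_cons]
    by_cases hh : f h = c
    · -- m = h, and the fold stays at h
      have hfind : (h :: x :: t').find? (fun y => f y == c) = some h :=
        List.find?_cons_of_pos (p := fun y => f y == c) (by simp [hh])
      rw [hfind] at hf
      injection hf with hf; subst hf
      have hstep : (if f h < f x then x else h) = h := by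
        rw [if_neg (not_lt.mpr (hh ▸ hb x List.mem_cons_self))]
      rw [hstep]
      exact foldl_max_stays f t' h (fun y hy => hh ▸ hb y (List.mem_cons_of_mem _ hy))
    · have hfx : (x :: t').find? (fun y => f y == c) = some m := by
        rwa [List.find?_cons_of_neg (p := fun y => f y == c) (by simp [hh])] at hf
      set h' := if f h < f x then x else h with hh'
      have hbt' : ∀ y ∈ t', f y ≤ c := fun y hy => hb y (List.mem_cons_of_mem _ hy)
      have hh'c : f h' ≤ c := by
        rw [hh']; split_ifs
        · exact hb x List.mem_cons_self
        · exact hhc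
      have hfind' : (h' :: t').find? (fun y => f y == c) = some m := by
        by_cases hx : f x = c
        · have hm : m = x := by
            have := List.find?_cons_of_pos (l := t') (a := x) (p := fun y => f y == c) (by simp [hx])
            rw [this] at hfx; injection hfx with hfx; exact hfx.symm
          have hex : h' = x := by
            rw [hh', if_pos (lt_of_le_of_ne (hx ▸ hhc) (hx ▸ hh))]
          rw [hex, hm]
          exact List.find?_cons_of_pos (p := fun y => f y == c) (by simp [hx])
        · have hmt : t'.find? (fun y => f y == c) = some m := by
            rwa [List.find?_cons_of_neg (p := fun y => f y == c) (by simp [hx])] at hfx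
          have hh'x : f h' ≠ c := by
            rw [hh']; split_ifs <;> assumption
          rw [List.find?_cons_of_neg (p := fun y => f y == c) (by simp [hh'x])]
          exact hmt
      exact ih h' hh'c hbt' hfind'

-- find? over the (score, map) pairs is find? over the maps
theorem find?_scored {α : Type} (f : α → Int) (l : List α) (t : Int) :
    ((l.map (fun m => (f m, m))).find? (fun p => p.1 == t)).map Prod.snd
      = l.find? (fun m => f m == t) := by
  rw [List.find?_map]
  cases h : l.find? (fun m => f m == t) with
  | none =>
    have h' : l.find? ((fun (p : Int × α) => p.1 == t) ∘ (fun m => (f m, m))) = none := h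
    rw [h']; rfl
  | some m =>
    have h' : l.find? ((fun (p : Int × α) => p.1 == t) ∘ (fun m => (f m, m))) = some m := h
    rw [h']; rfl

-- once the scan has found a map it keeps it
theorem foldl_scanStep_some (scored : List (Int × List (String × Option String)))
    (r : List (String × Option String)) (ts : List Int) :
    ts.foldl (scanStep scored) (some r) = some r := by
  induction ts with
  | nil => rfl
  | cons t ts' ih => rw [List.foldl_cons]; exact ih

-- the descending target list [n, n-1, ..., 0]
def targets (n : Nat) : List Int := ((List.range (n + 1)).reverse).map (fun k => (k : Int))

theorem targets_succ (n : Nat) : targets (n + 1) = ((n + 1 : Nat) : Int) :: targets n := by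
  unfold targets
  rw [List.range_succ, List.reverse_append]
  rfl

-- the descending bucket scan computes Python's max(l, key=f) when all scores lie in [0, n]
theorem scan_eq_max (f : List (String × Option String) → Int) :
    ∀ (n : Nat) (l : List (List (String × Option String))), l ≠ [] →
      (∀ x ∈ l, 0 ≤ f x ∧ f x ≤ (n : Int)) →
      (targets n).foldl (scanStep (l.map (fun m => (f m, m)))) none = PySem.List.max? l f := by
  intro n
  induction n with
  | zero =>
    intro l hne hb
    match l with
    | h :: t =>
      have hz : ∀ x ∈ h :: t, f x = 0 := fun x hx => le_antisymm (by exact_mod_cast (hb x hx).2) ((hb x hx).1)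
      have hfind : (h :: t).find? (fun m => f m == (0 : Int)) = some h :=
        List.find?_cons_of_pos (p := fun m => f m == (0 : Int)) (by simp [hz h List.mem_cons_self])
      have hstep : scanStep ((h :: t).map (fun m => (f m, m))) none ((0 : Nat) : Int)
          = some h := by
        show ((((h :: t).map (fun m => (f m, m))).find? (fun p => p.1 == ((0:Nat):Int))).map Prod.snd) = some h
        rw [find?_scored]
        exact_mod_cast hfind
      show List.foldl _ none (targets 0) = _
      rw [show targets 0 = [((0:Nat):Int)] from rfl, List.foldl_cons, hstep, List.foldl_nil]
      rw [max?_cons]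
      congr 1
      exact (foldl_max_stays f t h (fun y hy => by
        rw [hz y (List.mem_cons_of_mem _ hy), hz h List.mem_cons_self])).symm
  | succ n ih =>
    intro l hne hb
    rw [targets_succ, List.foldl_cons]
    have hstep : scanStep (l.map (fun m => (f m, m))) none ((n + 1 : Nat) : Int)
        = l.find? (fun m => f m == ((n + 1 : Nat) : Int)) := by
      show (((l.map (fun m => (f m, m))).find? (fun p => p.1 == ((n+1:Nat):Int))).map Prod.snd) = _
      rw [find?_scored]
    rw [hstep]
    cases hf : l.find? (fun m => f m == ((n + 1 : Nat) : Int)) with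
    | none =>
      have hb' : ∀ x ∈ l, 0 ≤ f x ∧ f x ≤ (n : Int) := by
        intro x hx
        refine ⟨(hb x hx).1, ?_⟩
        have hne' := List.find?_eq_none.mp hf x hx
        have hneq : f x ≠ ((n + 1 : Nat) : Int) := by simpa using hne'
        have h2 := (hb x hx).2
        push_cast at hneq h2 ⊢
        omega
      exact ih l hne hb'
    | some m =>
      rw [foldl_scanStep_some]
      match l with
      | h :: t =>
        rw [max?_cons]
        congr 1
        exact (foldl_max_attain f ((n + 1 : Nat) : Int) m t h
          (by exact_mod_cast (hb h List.mem_cons_self).2)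
          (fun x hx => by exact_mod_cast (hb x (List.mem_cons_of_mem _ hx)).2) hf).symm

-- A's fold from a saturated state (b, score b) computes Python's max(b :: l, key=score)
theorem foldA_eq_max (l : List (List (String × Option String)))
    (b : List (String × Option String)) :
    PySem.List.max? (b :: l) scoreA = some ((l.foldl chooseStepA (b, scoreA b)).1) := by
  induction l generalizing b with
  | nil => rfl
  | cons m t ih =>
    have h1 : PySem.List.max? (b :: m :: t) scoreA
        = PySem.List.max? ((if scoreA b < scoreA m then m else b) :: t) scoreA := by
      simp only [PySem.List.max?, List.foldl_cons]
      by_cases h : scoreA b < scoreA m <;> simp [h]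
    rw [h1, List.foldl_cons, chooseStepA_eq]
    by_cases h : scoreA b < scoreA m
    · simp only [if_pos h]; exact ih m
    · simp only [if_neg h]; exact ih b

-- ===== VERDICT (by name: the statement is the Claim_ definition above) =====
theorem choose_best_3007_spec : Claim_equal_choose_best_3007 := by
  intro pass_maps _ hpre
  unfold Spec_choose_best_3007
  match pass_maps with
  | [] => exact absurd rfl hpre
  | b0 :: rest =>
    have hmaxA : PySem.List.max? (b0 :: rest) scoreA
        = some (((b0 :: rest).foldl chooseStepA (b0, -1)).1) := by
      rw [List.foldl_cons, chooseStepA_eq]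
      have h0 : ((b0, (-1 : Int)).2 : Int) < scoreA b0 := by
        have := (scoreB_bounds b0).1
        rw [scoreB_eq_scoreA] at this
        omega
      rw [if_pos h0]
      exact foldA_eq_max rest b0
    have hscan : (targets 8).foldl
          (scanStep ((b0 :: rest).map (fun m => (scoreB m, m)))) none
        = PySem.List.max? (b0 :: rest) scoreB := by
      refine scan_eq_max scoreB 8 (b0 :: rest) (by simp) ?_
      intro x _
      exact ⟨(scoreB_bounds x).1, by exact_mod_cast (scoreB_bounds x).2⟩
    have hrange : PySem.List.pyRange 8 (-1) (-1) = targets 8 := by decide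
    show ((b0 :: rest).foldl chooseStepA (b0, -1)).1
        = choose_best_3007_alt (b0 :: rest)
    simp only [choose_best_3007_alt]
    rw [hrange, hscan, scoreB_funext, hmaxA]
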